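-- pv_equiv track=rewrite | github.com/dnix/performa | src/performa/reporting/pivot_report.py | _sort_line_items
-- ===== SOURCE A (Python) =====
-- from typing import List, Optional
--
-- def _sort_line_items(line_items: List[str]) -> List[str]:
--     """
--     Sort line items in logical financial statement order.
--
--     Args:
--         line_items: List of category → subcategory line item names
--
--     Returns:
--         Sorted list with Revenue first, then Expenses, then other categories
--     """
--     revenue_items = [item for item in line_items if item.startswith("Revenue")]
--     expense_items = [item for item in line_items if item.startswith("Expense")]
--     capital_items = [item for item in line_items if item.startswith("Capital")]
--     financing_items = [item for item in line_items if item.startswith("Financing")]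
--     other_items = [
--         item
--         for item in line_items
--         if not any(
--             item.startswith(prefix)
--             for prefix in ["Revenue", "Expense", "Capital", "Financing"]
--         )
--     ]
--
--     # Standard financial statement order
--     return (
--         sorted(revenue_items)
--         + sorted(expense_items)
--         + sorted(capital_items)
--         + sorted(financing_items)
--         + sorted(other_items)
--     )
-- ===== SOURCE B (Python) =====
-- def _sort_line_items(line_items):
--     def _rank(item):
--         if item.startswith("Revenue"):
--             return 0
--         if item.startswith("Expense"):
--             return 1
--         if item.startswith("Capital"):
--             return 2
--         if item.startswith("Financing"):
--             return 3
--         return 4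
--
--     return sorted(line_items, key=lambda item: (_rank(item), item))
-- ===== Notes on version B (the rewrite author's own statement) =====
-- stated objective: idiomatic
-- what changed: Replaces five filtering comprehensions, five separate sorts and a concatenation with a single keyed sort using a (rank, item) tuple key, where rank encodes the category precedence.
import Mathlib
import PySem

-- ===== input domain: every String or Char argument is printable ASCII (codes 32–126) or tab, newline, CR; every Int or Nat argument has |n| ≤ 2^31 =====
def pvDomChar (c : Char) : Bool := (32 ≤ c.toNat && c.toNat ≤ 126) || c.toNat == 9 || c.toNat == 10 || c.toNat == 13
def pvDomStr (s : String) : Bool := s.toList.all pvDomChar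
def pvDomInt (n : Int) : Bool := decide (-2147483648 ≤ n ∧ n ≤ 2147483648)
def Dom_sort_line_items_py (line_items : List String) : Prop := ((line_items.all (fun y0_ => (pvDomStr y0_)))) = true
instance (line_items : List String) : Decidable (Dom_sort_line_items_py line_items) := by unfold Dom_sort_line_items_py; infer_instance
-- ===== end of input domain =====

-- B replaces A's five filtering passes + five separate sorts + concatenation by one keyed
-- sort with the tuple key (category rank, item); same return value, same O(n log n) cost.

-- ===== PORT A =====
def sort_line_items_py (line_items : List String) : List String :=
  let revenue_items := line_items.filter (fun item => PySem.Str.startswith item "Revenue")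
  let expense_items := line_items.filter (fun item => PySem.Str.startswith item "Expense")
  let capital_items := line_items.filter (fun item => PySem.Str.startswith item "Capital")
  let financing_items := line_items.filter (fun item => PySem.Str.startswith item "Financing")
  let other_items := line_items.filter (fun item =>
    !(["Revenue", "Expense", "Capital", "Financing"].any (fun pfx => PySem.Str.startswith item pfx)))
  PySem.List.sorted revenue_items (fun x => x)
    ++ PySem.List.sorted expense_items (fun x => x)
    ++ PySem.List.sorted capital_items (fun x => x)
    ++ PySem.List.sorted financing_items (fun x => x)
    ++ PySem.List.sorted other_items (fun x => x)

-- ===== PORT B =====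
-- B-side helper: the `_rank` inner function of Source B
def pvRank (item : String) : Int :=
  if PySem.Str.startswith item "Revenue" then 0
  else if PySem.Str.startswith item "Expense" then 1
  else if PySem.Str.startswith item "Capital" then 2
  else if PySem.Str.startswith item "Financing" then 3
  else 4

def sort_line_items_py_alt (line_items : List String) : List String :=
  PySem.List.sorted2 line_items pvRank (fun item => item)

-- ===== PRECONDITION & SPEC =====
def Spec_sort_line_items_py (line_items : List String) (out : List String) : Prop := out = sort_line_items_py_alt line_items
instance (line_items : List String) (out : List String) : Decidable (Spec_sort_line_items_py line_items out) := by unfold Spec_sort_line_items_py; infer_instance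

-- ===== CLAIM (what is proved, stated in full; the proofs are below) =====
def Claim_equal_sort_line_items_py : Prop := ∀ (line_items : List String), Dom_sort_line_items_py line_items → Spec_sort_line_items_py line_items (sort_line_items_py line_items)

-- ===== LEMMAS AND PROOFS =====

-- the full comparison key of B's sort, as one lexicographic key
def pvKey (s : String) : Lex (Int × String) := toLex (pvRank s, s)

theorem pvKey_lt_iff (a b : String) : pvKey a < pvKey b ↔ pvRank a < pvRank b ∨ (pvRank a = pvRank b ∧ a < b) := by
  simp [pvKey, Prod.Lex.lt_iff]

theorem alt_eq_sorted_key (xs : List String) :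
    PySem.List.sorted2 xs pvRank (fun item => item) = PySem.List.sorted xs pvKey := by
  have hfun : (fun a b : String => decide (pvRank a < pvRank b) || (!decide (pvRank b < pvRank a) && decide (a < b)))
      = (fun a b : String => decide (pvKey a < pvKey b)) := by
    funext a b
    rcases lt_trichotomy (pvRank a) (pvRank b) with h | h | h
    · simp [pvKey_lt_iff, h]
    · simp [pvKey_lt_iff, h]
    · simp [pvKey_lt_iff, h, not_lt_of_gt h, ne_of_gt h]
  simp only [PySem.List.sorted2, PySem.List.sorted, Bool.false_eq_true, if_false]
  rw [hfun]

theorem head_of_startswith (s p : String) (c : Char) (hc : p.toList.head? = some c)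
    (h : PySem.Str.startswith s p = true) : s.toList.head? = some c := by
  rw [PySem.Str.startswith_eq, PySem.Chars.startswith_iff] at h
  obtain ⟨t, ht⟩ := h
  rw [← ht, List.head?_append_of_ne_nil]
  · exact hc
  · intro hnil; rw [hnil] at hc; simp at hc


theorem rank0_iff (s : String) : PySem.Str.startswith s "Revenue" = (pvRank s == 0) := by
  unfold pvRank
  by_cases hR : PySem.Str.startswith s "Revenue" = true
  · rw [hR]; simp
  · simp only [Bool.not_eq_true] at hR; rw [hR]; split_ifs <;> simp_all

theorem sw_excl (s p q : String) (c d : Char) (hc : p.toList.head? = some c) (hd : q.toList.head? = some d)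
    (hne : c ≠ d) (h : PySem.Str.startswith s p = true) : PySem.Str.startswith s q = false := by
  by_contra hq
  simp only [Bool.not_eq_false] at hq
  have h1 := head_of_startswith s p c hc h
  have h2 := head_of_startswith s q d hd hq
  rw [h1] at h2
  exact hne (Option.some.inj h2)

theorem rank1_iff (s : String) : PySem.Str.startswith s "Expense" = (pvRank s == 1) := by
  unfold pvRank
  by_cases hE : PySem.Str.startswith s "Expense" = true
  · have hR := sw_excl s "Expense" "Revenue" 'E' 'R' (by decide) (by decide) (by decide) hE
    rw [hE, hR]; simp
  · simp only [Bool.not_eq_true] at hE; rw [hE]; split_ifs <;> simp_all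

theorem rank2_iff (s : String) : PySem.Str.startswith s "Capital" = (pvRank s == 2) := by
  unfold pvRank
  by_cases hC : PySem.Str.startswith s "Capital" = true
  · have hR := sw_excl s "Capital" "Revenue" 'C' 'R' (by decide) (by decide) (by decide) hC
    have hE := sw_excl s "Capital" "Expense" 'C' 'E' (by decide) (by decide) (by decide) hC
    rw [hC, hR, hE]; simp
  · simp only [Bool.not_eq_true] at hC; rw [hC]; split_ifs <;> simp_all

theorem rank3_iff (s : String) : PySem.Str.startswith s "Financing" = (pvRank s == 3) := by
  unfold pvRank
  by_cases hF : PySem.Str.startswith s "Financing" = true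
  · have hR := sw_excl s "Financing" "Revenue" 'F' 'R' (by decide) (by decide) (by decide) hF
    have hE := sw_excl s "Financing" "Expense" 'F' 'E' (by decide) (by decide) (by decide) hF
    have hC := sw_excl s "Financing" "Capital" 'F' 'C' (by decide) (by decide) (by decide) hF
    rw [hF, hR, hE, hC]; simp
  · simp only [Bool.not_eq_true] at hF; rw [hF]; split_ifs <;> simp_all

theorem rank4_iff (s : String) :
    (!(["Revenue", "Expense", "Capital", "Financing"].any (fun p => PySem.Str.startswith s p))) = (pvRank s == 4) := by
  unfold pvRank
  simp only [List.any_cons, List.any_nil, Bool.or_false, Bool.not_or]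
  split_ifs with h0 h1 h2 h3 <;> simp_all

theorem split_filter {α : Type} (xs : List α) (q p : α → Bool) (hpq : ∀ x, p x = true → q x = true) :
    (xs.filter q).Perm (xs.filter p ++ xs.filter (fun x => q x && !p x)) := by
  have h := (List.filter_append_perm p (xs.filter q)).symm
  rw [List.filter_filter, List.filter_filter] at h
  have e : xs.filter (fun a => p a && q a) = xs.filter p := by
    apply List.filter_congr; intro x _
    by_cases hp : p x = true
    · simp [hp, hpq x hp]
    · simp only [Bool.not_eq_true] at hp; simp [hp]
  have e2 : (fun a => !p a && q a) = (fun x => q x && !p x) := by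
    funext a; exact Bool.and_comm _ _
  rw [e, e2] at h
  exact h

theorem pvRank_range (s : String) : pvRank s = 0 ∨ pvRank s = 1 ∨ pvRank s = 2 ∨ pvRank s = 3 ∨ pvRank s = 4 := by
  unfold pvRank; split_ifs <;> simp

theorem buckets_perm (xs : List String) :
    (xs.filter (fun s => pvRank s == 0) ++ xs.filter (fun s => pvRank s == 1)
      ++ xs.filter (fun s => pvRank s == 2) ++ xs.filter (fun s => pvRank s == 3)
      ++ xs.filter (fun s => pvRank s == 4)).Perm xs := by
  have h0 := (List.filter_append_perm (fun s => pvRank s == 0) xs).symm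
  have h1 := split_filter xs (fun s : String => !(pvRank s == 0)) (fun s => pvRank s == 1)
    (by intro x h
        have hx : pvRank x = 1 := by simpa using h
        simp only [hx]; decide)
  have h2 := split_filter xs (fun x : String => !(pvRank x == 0) && !(pvRank x == 1)) (fun s => pvRank s == 2)
    (by intro x h
        have hx : pvRank x = 2 := by simpa using h
        simp only [hx]; decide)
  have h3 := split_filter xs (fun x : String => (!(pvRank x == 0) && !(pvRank x == 1)) && !(pvRank x == 2)) (fun s => pvRank s == 3)
    (by intro x h
        have hx : pvRank x = 3 := by simpa using h
        simp only [hx]; decide)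
  have e4 : xs.filter (fun x : String => ((!(pvRank x == 0) && !(pvRank x == 1)) && !(pvRank x == 2)) && !(pvRank x == 3)) = xs.filter (fun s => pvRank s == 4) := by
    apply List.filter_congr; intro x _
    rcases pvRank_range x with h | h | h | h | h <;> simp [h]
  beta_reduce at h1 h2 h3
  have H : xs.Perm (xs.filter (fun s => pvRank s == 0) ++ (xs.filter (fun s => pvRank s == 1)
      ++ (xs.filter (fun s => pvRank s == 2) ++ (xs.filter (fun s => pvRank s == 3)
      ++ xs.filter (fun s => pvRank s == 4))))) := by
    refine h0.trans (List.Perm.append_left _ (h1.trans (List.Perm.append_left _ (h2.trans (List.Perm.append_left _ (h3.trans (List.Perm.append_left _ ?_)))))))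
    rw [e4]
  simpa [List.append_assoc] using H.symm

theorem pvKey_le_iff (a b : String) : pvKey a ≤ pvKey b ↔ pvRank a < pvRank b ∨ (pvRank a = pvRank b ∧ a ≤ b) := by
  simp [pvKey, Prod.Lex.le_iff]

theorem mem_bucket {xs : List String} {i : Int} {a : String}
    (h : a ∈ PySem.List.sorted (xs.filter (fun s => pvRank s == i)) (fun x => x)) : pvRank a = i := by
  rw [PySem.List.mem_sorted, List.mem_filter] at h
  simpa using h.2

theorem bucket_pairwise (xs : List String) (i : Int) :
    (PySem.List.sorted (xs.filter (fun s => pvRank s == i)) (fun x => x)).Pairwise (fun a b => pvKey a ≤ pvKey b) := by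
  have hp := PySem.List.sorted_pairwise (xs.filter (fun s => pvRank s == i)) (fun x : String => x)
  refine hp.imp_of_mem ?_
  intro a b ha hb hab
  rw [pvKey_le_iff, mem_bucket ha, mem_bucket hb]
  exact Or.inr ⟨rfl, hab⟩

theorem cross_bucket {xs : List String} {i j : Int} (hij : i < j) (a b : String)
    (ha : a ∈ PySem.List.sorted (xs.filter (fun s => pvRank s == i)) (fun x => x))
    (hb : b ∈ PySem.List.sorted (xs.filter (fun s => pvRank s == j)) (fun x => x)) :
    pvKey a ≤ pvKey b := by
  rw [pvKey_le_iff, mem_bucket ha, mem_bucket hb]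
  exact Or.inl hij

theorem a_out_pairwise (xs : List String) :
    (PySem.List.sorted (xs.filter (fun s => pvRank s == 0)) (fun x => x)
      ++ PySem.List.sorted (xs.filter (fun s => pvRank s == 1)) (fun x => x)
      ++ PySem.List.sorted (xs.filter (fun s => pvRank s == 2)) (fun x => x)
      ++ PySem.List.sorted (xs.filter (fun s => pvRank s == 3)) (fun x => x)
      ++ PySem.List.sorted (xs.filter (fun s => pvRank s == 4)) (fun x => x)).Pairwise
      (fun a b => pvKey a ≤ pvKey b) := by
  simp only [List.pairwise_append]
  refine ⟨⟨⟨⟨bucket_pairwise xs 0, bucket_pairwise xs 1, ?_⟩, bucket_pairwise xs 2, ?_⟩,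
    bucket_pairwise xs 3, ?_⟩, bucket_pairwise xs 4, ?_⟩
  · intro a ha b hb; exact cross_bucket (by decide) a b ha hb
  · intro a ha b hb
    rcases List.mem_append.mp ha with ha | ha
    · exact cross_bucket (by decide) a b ha hb
    · exact cross_bucket (by decide) a b ha hb
  · intro a ha b hb
    rcases List.mem_append.mp ha with ha | ha
    · rcases List.mem_append.mp ha with ha | ha
      · exact cross_bucket (by decide) a b ha hb
      · exact cross_bucket (by decide) a b ha hb
    · exact cross_bucket (by decide) a b ha hb
  · intro a ha b hb
    rcases List.mem_append.mp ha with ha | ha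
    · rcases List.mem_append.mp ha with ha | ha
      · rcases List.mem_append.mp ha with ha | ha
        · exact cross_bucket (by decide) a b ha hb
        · exact cross_bucket (by decide) a b ha hb
      · exact cross_bucket (by decide) a b ha hb
    · exact cross_bucket (by decide) a b ha hb

theorem pvKey_injective : Function.Injective pvKey := by
  intro a b h
  have := congrArg (fun x => (ofLex x).2) h
  simpa [pvKey] using this

theorem a_eq_alt (xs : List String) :
    (PySem.List.sorted (xs.filter (fun item => PySem.Str.startswith item "Revenue")) (fun x => x)
      ++ PySem.List.sorted (xs.filter (fun item => PySem.Str.startswith item "Expense")) (fun x => x)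
      ++ PySem.List.sorted (xs.filter (fun item => PySem.Str.startswith item "Capital")) (fun x => x)
      ++ PySem.List.sorted (xs.filter (fun item => PySem.Str.startswith item "Financing")) (fun x => x)
      ++ PySem.List.sorted (xs.filter (fun item =>
          !(["Revenue", "Expense", "Capital", "Financing"].any (fun pfx => PySem.Str.startswith item pfx)))) (fun x => x))
    = PySem.List.sorted2 xs pvRank (fun item => item) := by
  rw [alt_eq_sorted_key]
  rw [show (fun item => PySem.Str.startswith item "Revenue") = (fun s => pvRank s == 0) from funext rank0_iff]
  rw [show (fun item => PySem.Str.startswith item "Expense") = (fun s => pvRank s == 1) from funext rank1_iff]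
  rw [show (fun item => PySem.Str.startswith item "Capital") = (fun s => pvRank s == 2) from funext rank2_iff]
  rw [show (fun item => PySem.Str.startswith item "Financing") = (fun s => pvRank s == 3) from funext rank3_iff]
  rw [show (fun item => !(["Revenue", "Expense", "Capital", "Financing"].any (fun pfx => PySem.Str.startswith item pfx))) = (fun s => pvRank s == 4) from funext rank4_iff]
  refine PySem.List.eq_of_perm_of_pairwise_le_of_injective pvKey pvKey_injective ?_ (a_out_pairwise xs)
    (PySem.List.sorted_pairwise xs pvKey)
  refine List.Perm.trans ?_ (PySem.List.sorted_perm xs pvKey false).symm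
  refine List.Perm.trans ?_ (buckets_perm xs)
  exact ((((PySem.List.sorted_perm _ _ false).append (PySem.List.sorted_perm _ _ false)).append
    (PySem.List.sorted_perm _ _ false)).append (PySem.List.sorted_perm _ _ false)).append
    (PySem.List.sorted_perm _ _ false)

-- ===== VERDICT (by name: the statement is the Claim_ definition above) =====
theorem sort_line_items_py_spec : Claim_equal_sort_line_items_py := by
  intro xs _
  unfold Spec_sort_line_items_py sort_line_items_py sort_line_items_py_alt
  exact a_eq_alt xs
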